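-- pv_equiv track=rewrite | github.com/Patxi91/CodeWars_Cloud | 6kyu-Simple Fun #46 Cipher26-Patxi.py | cipher26
-- ===== SOURCE A (Python) =====
-- def cipher26(message):
--     decrypted = []
--     sum_mod26 = 0
--     for letter in message:
--         val = ord(letter) - ord('a')
--         decrypted_val = (val - sum_mod26) % 26
--         decrypted.append(chr(decrypted_val + ord('a')))
--         sum_mod26 = (sum_mod26 + decrypted_val) % 26
--     return ''.join(decrypted)
-- ===== SOURCE B (Python) =====
-- def cipher26(message):
--     # Staged, stateless decomposition: extract letter values, then pair each
--     # value with its predecessor by zipping against the shifted list, and map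
--     # the modular difference of each pair to a letter. No running accumulator.
--     vals = [ord(c) - ord('a') for c in message]
--     return ''.join(chr((cur - prev) % 26 + ord('a'))
--                    for prev, cur in zip([0] + vals, vals))
-- ===== Notes on version B (the rewrite author's own statement) =====
-- stated objective: simpler
-- what changed: B replaces A's stateful loop (subtract a running mod-26 accumulator of decrypted values, then fold each result back into it) by a stateless staged pipeline: map letters to values, zip the list with its one-shifted copy, and map each adjacent pair to its modular difference, using the identity that A's accumulator always equals the previous letter's value mod 26.
import Mathlib
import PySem

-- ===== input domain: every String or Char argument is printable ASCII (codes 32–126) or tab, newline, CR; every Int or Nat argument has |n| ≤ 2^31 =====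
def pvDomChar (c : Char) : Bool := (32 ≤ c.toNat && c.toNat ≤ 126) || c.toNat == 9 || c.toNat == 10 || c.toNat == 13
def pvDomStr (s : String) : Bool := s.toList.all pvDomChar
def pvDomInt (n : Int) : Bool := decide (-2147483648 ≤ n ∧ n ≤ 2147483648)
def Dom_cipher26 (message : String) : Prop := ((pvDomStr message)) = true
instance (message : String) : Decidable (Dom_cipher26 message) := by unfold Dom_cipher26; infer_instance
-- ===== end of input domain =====

-- B replaces A's stateful accumulator loop by a stateless staged pipeline
-- (map to values, zip with shifted copy, map pair differences): simpler.

-- ===== PORT A =====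
-- A: single pass keeping `decrypted` (list so far) and `sum_mod26`, the running
-- sum of decrypted values mod 26; joined at the end.
def cipher26 (message : String) : String :=
  let st := message.toList.foldl
    (fun (st : List Char × Int) letter =>
      let val : Int := (letter.toNat : Int) - 97
      let decrypted_val := PySem.Int.mod (val - st.2) 26
      (st.1 ++ [Char.ofNat (decrypted_val + 97).toNat],
       PySem.Int.mod (st.2 + decrypted_val) 26))
    ([], 0)
  String.ofList st.1

-- ===== PORT B =====
-- B: stage 1 maps letters to values; stage 2 zips the value list with its
-- one-shifted copy (0-prefixed); stage 3 maps each (prev, cur) pair to a letter.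
def cipher26_alt (message : String) : String :=
  let vals : List Int := message.toList.map (fun c => (c.toNat : Int) - 97)
  String.ofList (((0 :: vals).zip vals).map
    (fun p => Char.ofNat (PySem.Int.mod (p.2 - p.1) 26 + 97).toNat))

-- ===== PRECONDITION & SPEC =====
def Spec_cipher26 (message : String) (out : String) : Prop := out = cipher26_alt message
instance (message : String) (out : String) : Decidable (Spec_cipher26 message out) := by unfold Spec_cipher26; infer_instance

-- ===== CLAIM (what is proved, stated in full; the proofs are below) =====
def Claim_equal_cipher26 : Prop := ∀ (message : String), Dom_cipher26 message → Spec_cipher26 message (cipher26 message)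

-- ===== LEMMAS AND PROOFS =====

-- Invariant: A's running sum equals (prev mod 26), where prev is the raw value
-- of the previous letter — precisely the left component of B's zipped pairs.
theorem cipher26_loop_eq (cs : List Char) :
    ∀ (acc : List Char) (s prev : Int), s = PySem.Int.mod prev 26 →
    (cs.foldl
      (fun (st : List Char × Int) letter =>
        let val : Int := (letter.toNat : Int) - 97
        let decrypted_val := PySem.Int.mod (val - st.2) 26
        (st.1 ++ [Char.ofNat (decrypted_val + 97).toNat],
         PySem.Int.mod (st.2 + decrypted_val) 26))
      (acc, s)).1
    = acc ++ (((prev :: cs.map (fun c => (c.toNat : Int) - 97)).zip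
              (cs.map (fun c => (c.toNat : Int) - 97))).map
        (fun p => Char.ofNat (PySem.Int.mod (p.2 - p.1) 26 + 97).toNat)) := by
  induction cs with
  | nil => intro acc s prev _; simp
  | cons c rest ih =>
    intro acc s prev hs
    have h26 : ∀ a : Int, PySem.Int.mod a 26 = a % 26 :=
      fun a => PySem.Int.mod_eq_emod_of_pos (by norm_num)
    set cur : Int := ((c.toNat : Int) - 97) with hcur
    have hdv : PySem.Int.mod (cur - s) 26 = PySem.Int.mod (cur - prev) 26 := by
      rw [h26, h26, hs, h26]; omega
    have hs' : PySem.Int.mod (s + PySem.Int.mod (cur - s) 26) 26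
        = PySem.Int.mod cur 26 := by
      rw [h26, h26, hs, h26, h26]; omega
    simp only [List.foldl_cons, List.map_cons, List.zip_cons_cons]
    rw [hdv] at hs' ⊢
    rw [ih (acc ++ [Char.ofNat (PySem.Int.mod (cur - prev) 26 + 97).toNat]) _ cur hs']
    simp
    exact ⟨rfl, rfl⟩

-- ===== VERDICT (by name: the statement is the Claim_ definition above) =====
theorem cipher26_spec : Claim_equal_cipher26 := by
  intro message _
  unfold Spec_cipher26 cipher26 cipher26_alt
  simp only []
  rw [cipher26_loop_eq message.toList [] 0 0 (by decide)]
  rfl
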